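-- pv_equiv track=rewrite | github.com/huythai855/hangman | cap-flipping.py | flip_cap
-- ===== SOURCE A (Python) =====
-- def flip_cap(number_of_cap, cap_status):
--     """
--     :param number_of_cap: integer, the number of cap in the line.
--     :param cap_status: string, the status of each caps in the line respectively.
--     :return: a list containing pair of the start and end position of the group needed to flip cap.
--     """
--     last_cap_status = '#'
--     first_position = [0 for i in range(int(number_of_cap))]
--
--     count_forward_group = 0
--     count_backward_group = 0
--
--     for i in range(int(number_of_cap)):
--         if cap_status[i] == 'H':
--             last_cap_status = cap_status[i]
--             continue
--         if cap_status[i] == last_cap_status: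
--             first_position[i] = first_position[i - 1]
--             continue
--         first_position[i] = i
--         last_cap_status = cap_status[i]
--         if cap_status[i] == 'F':
--             count_forward_group += 1
--         else:
--             count_backward_group += 1
--
--     # Determine which type of hat status need to be flipped
--     cap_need_to_flip = 'B' if (count_backward_group < count_forward_group) else 'F'
--
--     flipping_list = []
--     last_cap_status = '#'
--     for i in range(int(number_of_cap) - 1, -1, -1):
--         if cap_status[i] == cap_need_to_flip and cap_status[i] != last_cap_status:
--             flipping_list.append((first_position[i], i))
--         last_cap_status = cap_status[i]
--
--     # Reverse the list to print the result in ascending order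
--     flipping_list = flipping_list[::-1]
--
--     return flipping_list
-- ===== SOURCE B (Python) =====
-- from itertools import groupby
--
--
-- def flip_cap(number_of_cap, cap_status):
--     n = int(number_of_cap)
--     caps = [cap_status[i] for i in range(n)]
--     runs = []
--     pos = 0
--     for ch, grp in groupby(caps):
--         length = len(list(grp))
--         runs.append((ch, pos, pos + length - 1))
--         pos += length
--     count_f = sum(1 for ch, _, _ in runs if ch == 'F')
--     count_b = sum(1 for ch, _, _ in runs if ch != 'F' and ch != 'H')
--     flip = 'B' if count_b < count_f else 'F'
--     return [(a, b) for ch, a, b in runs if ch == flip]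
-- ===== Notes on version B (the rewrite author's own statement) =====
-- stated objective: simpler
-- what changed: B builds the maximal equal-character runs once (itertools.groupby style), counts 'F' runs vs other non-'H' runs, and filters the run list by the chosen character, replacing A's first_position array pass plus backward emitting pass with sentinel state.
-- intended difference: On prefixes whose first character is '#' (colliding with A's sentinel) A never counts the leading run as a backward group, so exactly when the F-run count equals the other-run count A returns the list of 'B' runs (often []) while B returns the 'F' runs, which is the tie-break the code intends for every other input. — e.g. on flip_cap(2, "#F"): A returns [], B returns [(1, 1)]
import Mathlib
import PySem

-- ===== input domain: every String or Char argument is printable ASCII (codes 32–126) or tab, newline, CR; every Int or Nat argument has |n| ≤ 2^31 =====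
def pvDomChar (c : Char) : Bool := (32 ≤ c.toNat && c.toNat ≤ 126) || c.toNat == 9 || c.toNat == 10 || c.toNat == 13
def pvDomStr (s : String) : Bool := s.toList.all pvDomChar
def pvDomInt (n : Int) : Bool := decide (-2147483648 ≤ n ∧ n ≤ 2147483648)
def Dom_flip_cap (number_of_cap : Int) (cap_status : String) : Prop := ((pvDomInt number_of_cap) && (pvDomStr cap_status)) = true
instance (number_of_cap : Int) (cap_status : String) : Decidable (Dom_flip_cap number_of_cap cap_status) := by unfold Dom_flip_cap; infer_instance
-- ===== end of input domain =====

-- B re-implements the cap-flipping grouper with one groupby-style run decomposition (runs built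
-- once, then counted and filtered) instead of A's first_position array plus a second backward
-- emitting pass; same cost class, objective: simpler.

-- ===== PORT A =====
-- literal port of A: loop 1 builds first_position/counts over range(int(n)),
-- loop 2 walks range(n-1,-1,-1) appending group ends, then the list is reversed.
def flip_cap (number_of_cap : Int) (cap_status : String) : List (Int × Int) :=
  let cs := cap_status.toList
  let n : Nat := number_of_cap.toNat          -- range(int(m)) is empty for m ≤ 0
  let st := (List.range n).foldl (fun (st : Char × List Int × Int × Int) (i : Nat) =>
      let last := st.1; let fp := st.2.1; let cf := st.2.2.1; let cb := st.2.2.2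
      let c := PySem.List.pyGetD cs (i : Int) ' '   -- cap_status[i]; in range under Pre_
      if c = 'H' then (c, fp, cf, cb)
      else if c = last then (last, fp.set i (PySem.List.pyGetD fp ((i : Int) - 1) 0), cf, cb)
      else if c = 'F' then (c, fp.set i ((i : Nat) : Int), cf + 1, cb)
      else (c, fp.set i ((i : Nat) : Int), cf, cb + 1))
    (('#' : Char), (List.range n).map (fun _ => (0 : Int)), (0 : Int), (0 : Int))
  let fp := st.2.1
  let flipc : Char := if st.2.2.2 < st.2.2.1 then 'B' else 'F'
  let r := ((List.range n).reverse).foldl (fun (st2 : List (Int × Int) × Char) (i : Nat) =>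
      let c := PySem.List.pyGetD cs (i : Int) ' '
      if c = flipc ∧ c ≠ st2.2 then
        (st2.1 ++ [(PySem.List.pyGetD fp (i : Int) 0, ((i : Nat) : Int))], c)
      else (st2.1, c)) ([], ('#' : Char))
  r.1.reverse

-- ===== PORT B =====
-- itertools.groupby of Source B: peel one maximal run per step (fuel = list length keeps the
-- recursion structural; with fuel ≥ length it is exactly groupby)
def pvAltGroupF : Nat → List Char → Int → List (Char × Int × Int)
  | _, [], _ => []
  | 0, _ :: _, _ => []
  | fuel+1, c :: rest, pos =>
    let grp := rest.takeWhile (fun d => d == c)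
    let len : Int := 1 + grp.length
    (c, pos, pos + len - 1) :: pvAltGroupF fuel (rest.dropWhile (fun d => d == c)) (pos + len)

def pvAltGroup (l : List Char) (pos : Int) : List (Char × Int × Int) := pvAltGroupF l.length l pos

def flip_cap_alt (number_of_cap : Int) (cap_status : String) : List (Int × Int) :=
  let caps := (List.range number_of_cap.toNat).map
      (fun (i : Nat) => PySem.List.pyGetD cap_status.toList (i : Int) ' ')   -- [cap_status[i] for i in range(n)]
  let runs := pvAltGroup caps 0
  let count_f := (runs.map (fun r => if r.1 = 'F' then (1 : Int) else 0)).sum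
  let count_b := (runs.map (fun r => if r.1 ≠ 'F' ∧ r.1 ≠ 'H' then (1 : Int) else 0)).sum
  let flip : Char := if count_b < count_f then 'B' else 'F'
  (runs.filter (fun r => r.1 == flip)).map (fun r => (r.2.1, r.2.2))

-- ===== PRECONDITION & SPEC =====
-- Pre_ excludes exactly the inputs where A raises IndexError: cap_status[i] with
-- number_of_cap exceeding the string length.
def Pre_flip_cap (number_of_cap : Int) (cap_status : String) : Prop :=
  number_of_cap ≤ (cap_status.toList.length : Int)
instance (number_of_cap : Int) (cap_status : String) : Decidable (Pre_flip_cap number_of_cap cap_status) := by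
  unfold Pre_flip_cap; infer_instance
def pvWitness_flip_cap : Int × String := (6, "FHFBBF")

-- run characters of a list (adjacent-duplicate collapse), used only by D_
def pvRunChars : List Char → List Char
  | [] => []
  | [c] => [c]
  | c :: d :: rest => if c = d then pvRunChars (d :: rest) else c :: pvRunChars (d :: rest)

-- When the considered prefix starts with '#' (A's sentinel value) A never counts that leading run
-- as a backward group, so exactly when the prefix's F-run count equals its other-run count A flips
-- the 'B' groups where B flips the 'F' groups (the tie-break the code intends): A's choice there is
-- an accident of the '#' sentinel colliding with input data, so B's value is the intended one.
def D_flip_cap (number_of_cap : Int) (cap_status : String) : Prop :=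
  1 ≤ number_of_cap ∧
  (cap_status.toList.take number_of_cap.toNat).head? = some '#' ∧
  (pvRunChars (cap_status.toList.take number_of_cap.toNat)).countP (fun c => c == 'F')
    = (pvRunChars (cap_status.toList.take number_of_cap.toNat)).countP (fun c => c != 'F' && c != 'H')
instance (number_of_cap : Int) (cap_status : String) : Decidable (D_flip_cap number_of_cap cap_status) := by
  unfold D_flip_cap; infer_instance

def Spec_flip_cap (number_of_cap : Int) (cap_status : String) (out : List (Int × Int)) : Prop :=
  ¬ D_flip_cap number_of_cap cap_status → out = flip_cap_alt number_of_cap cap_status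
instance (number_of_cap : Int) (cap_status : String) (out : List (Int × Int)) : Decidable (Spec_flip_cap number_of_cap cap_status out) := by
  unfold Spec_flip_cap; infer_instance

def pvDiffWitness_flip_cap : Int × String := (2, "#F")
def pvDiffWitnessOut_flip_cap : (List (Int × Int)) × (List (Int × Int)) := ([], [(1, 1)])

-- ===== CLAIM (what is proved, stated in full; the proofs are below) =====
def Claim_unchanged_flip_cap : Prop := ∀ (number_of_cap : Int) (cap_status : String), Dom_flip_cap number_of_cap cap_status → Pre_flip_cap number_of_cap cap_status → Spec_flip_cap number_of_cap cap_status (flip_cap number_of_cap cap_status)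
def Claim_exact_flip_cap : Prop := ∀ (number_of_cap : Int) (cap_status : String), Dom_flip_cap number_of_cap cap_status → Pre_flip_cap number_of_cap cap_status → D_flip_cap number_of_cap cap_status → flip_cap number_of_cap cap_status ≠ flip_cap_alt number_of_cap cap_status
def Claim_changed_flip_cap : Prop := Dom_flip_cap (pvDiffWitness_flip_cap.1) (pvDiffWitness_flip_cap.2) ∧ Pre_flip_cap (pvDiffWitness_flip_cap.1) (pvDiffWitness_flip_cap.2) ∧ D_flip_cap (pvDiffWitness_flip_cap.1) (pvDiffWitness_flip_cap.2) ∧ flip_cap (pvDiffWitness_flip_cap.1) (pvDiffWitness_flip_cap.2) = pvDiffWitnessOut_flip_cap.1 ∧ flip_cap_alt (pvDiffWitness_flip_cap.1) (pvDiffWitness_flip_cap.2) = pvDiffWitnessOut_flip_cap.2 ∧ pvDiffWitnessOut_flip_cap.1 ≠ pvDiffWitnessOut_flip_cap.2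

-- ===== LEMMAS AND PROOFS =====

-- recursion-friendly reformulations of A's two index loops
def pvLoop1 : List Char → Nat → (Char × List Int × Int × Int) → (Char × List Int × Int × Int)
  | [], _, st => st
  | c :: rest, k, st =>
    let last := st.1; let fp := st.2.1; let cf := st.2.2.1; let cb := st.2.2.2
    pvLoop1 rest (k+1) (
      if c = 'H' then (c, fp, cf, cb)
      else if c = last then (last, fp.set k (PySem.List.pyGetD fp ((k : Int) - 1) 0), cf, cb)
      else if c = 'F' then (c, fp.set k ((k : Nat) : Int), cf + 1, cb)
      else (c, fp.set k ((k : Nat) : Int), cf, cb + 1))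

def pvLoop2 (flipc : Char) (fp : List Int) : List Char → Nat → (List (Int × Int) × Char) → List (Int × Int) × Char
  | [], _, st => st
  | c :: rest, k, st =>
    let st' := pvLoop2 flipc fp rest (k+1) st
    if c = flipc ∧ c ≠ st'.2 then (st'.1 ++ [(PySem.List.pyGetD fp (k : Int) 0, ((k : Nat) : Int))], c)
    else (st'.1, c)

theorem pv_bridge1 (cs : List Char) (l : List Char) (k : Nat) (st : Char × List Int × Int × Int)
    (hj : ∀ j, (h : j < l.length) → PySem.List.pyGetD cs ((k + j : Nat) : Int) ' ' = l[j]) :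
    (List.range' k l.length).foldl (fun (st : Char × List Int × Int × Int) (i : Nat) =>
      let last := st.1; let fp := st.2.1; let cf := st.2.2.1; let cb := st.2.2.2
      let c := PySem.List.pyGetD cs (i : Int) ' '
      if c = 'H' then (c, fp, cf, cb)
      else if c = last then (last, fp.set i (PySem.List.pyGetD fp ((i : Int) - 1) 0), cf, cb)
      else if c = 'F' then (c, fp.set i ((i : Nat) : Int), cf + 1, cb)
      else (c, fp.set i ((i : Nat) : Int), cf, cb + 1)) st = pvLoop1 l k st := by
  induction l generalizing k st with
  | nil => simp [pvLoop1]
  | cons c rest ih =>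
    have h0 := hj 0 (by simp)
    simp only [Nat.add_zero, List.getElem_cons_zero] at h0
    rw [List.length_cons, List.range'_succ, List.foldl_cons, pvLoop1]
    rw [show PySem.List.pyGetD cs (↑k) ' ' = c from h0]
    exact ih (k+1) _ (fun j hjj => by
      have := hj (j+1) (by simpa using Nat.succ_lt_succ hjj)
      simpa [Nat.add_comm, Nat.add_assoc, Nat.add_left_comm] using this)

theorem pv_bridge2 (cs : List Char) (flipc : Char) (fp : List Int) (l : List Char) (k : Nat)
    (st : List (Int × Int) × Char)
    (hj : ∀ j, (h : j < l.length) → PySem.List.pyGetD cs ((k + j : Nat) : Int) ' ' = l[j]) :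
    ((List.range' k l.length).reverse).foldl (fun (st2 : List (Int × Int) × Char) (i : Nat) =>
      let c := PySem.List.pyGetD cs (i : Int) ' '
      if c = flipc ∧ c ≠ st2.2 then
        (st2.1 ++ [(PySem.List.pyGetD fp (i : Int) 0, ((i : Nat) : Int))], c)
      else (st2.1, c)) st = pvLoop2 flipc fp l k st := by
  induction l generalizing k st with
  | nil => simp [pvLoop2]
  | cons c rest ih =>
    have h0 := hj 0 (by simp)
    simp only [Nat.add_zero, List.getElem_cons_zero] at h0
    rw [List.length_cons, List.range'_succ, List.reverse_cons, List.foldl_append, List.foldl_cons,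
      List.foldl_nil, pvLoop2]
    rw [ih (k+1) st (fun j hjj => by
      have := hj (j+1) (by simpa using Nat.succ_lt_succ hjj)
      simpa [Nat.add_comm, Nat.add_assoc, Nat.add_left_comm] using this)]
    rw [show PySem.List.pyGetD cs (↑k) ' ' = c from h0]

theorem pv_getD_set_self (fp : List Int) (k : Nat) (v : Int) (h : k < fp.length) :
    PySem.List.pyGetD (fp.set k v) ((k : Nat) : Int) 0 = v := by
  rw [PySem.List.pyGetD_natCast]
  simp [List.getD, h]

theorem pv_getD_set_ne (fp : List Int) (k i : Nat) (v : Int) (h : i ≠ k) :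
    PySem.List.pyGetD (fp.set k v) ((i : Nat) : Int) 0 = PySem.List.pyGetD fp ((i : Nat) : Int) 0 := by
  rw [PySem.List.pyGetD_natCast, PySem.List.pyGetD_natCast]
  simp [List.getD, List.getElem?_set_ne (Ne.symm h)]

theorem pvLoop1_H (m : Nat) : ∀ (k : Nat) (rest : List Char) (fp : List Int) (cf cb : Int),
    pvLoop1 (List.replicate m 'H' ++ rest) k ('H', fp, cf, cb) = pvLoop1 rest (k + m) ('H', fp, cf, cb) := by
  induction m with
  | zero => intro k rest fp cf cb; simp
  | succ m ih =>
    intro k rest fp cf cb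
    rw [List.replicate_succ, List.cons_append, pvLoop1]
    simp only [if_true]
    rw [ih (k+1) rest fp cf cb]
    have h : k + 1 + m = k + (m + 1) := by omega
    rw [h]

theorem pvLoop1_const (c : Char) (hc : c ≠ 'H') (m : Nat) :
    ∀ (k : Nat) (v : Int) (rest : List Char) (fp : List Int) (cf cb : Int),
    k + m ≤ fp.length →
    PySem.List.pyGetD fp ((k : Int) - 1) 0 = v →
    ∃ fp', pvLoop1 (List.replicate m c ++ rest) k (c, fp, cf, cb) = pvLoop1 rest (k + m) (c, fp', cf, cb)
      ∧ fp'.length = fp.length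
      ∧ (∀ i : Nat, (i < k ∨ k + m ≤ i) → PySem.List.pyGetD fp' ((i : Nat) : Int) 0 = PySem.List.pyGetD fp ((i : Nat) : Int) 0)
      ∧ (∀ i : Nat, k ≤ i → i < k + m → PySem.List.pyGetD fp' ((i : Nat) : Int) 0 = v) := by
  induction m with
  | zero =>
    intro k v rest fp cf cb _ _
    exact ⟨fp, by simp, rfl, fun i _ => rfl, fun i h1 h2 => by omega⟩
  | succ m ih =>
    intro k v rest fp cf cb hlen hv
    have hk : k < fp.length := by omega
    rw [List.replicate_succ, List.cons_append, pvLoop1]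
    simp only [if_neg hc, if_true]
    rw [hv]
    have hv' : PySem.List.pyGetD (fp.set k v) (((k+1 : Nat) : Int) - 1) 0 = v := by
      have : (((k+1 : Nat) : Int) - 1) = ((k : Nat) : Int) := by push_cast; ring
      rw [this]; exact pv_getD_set_self fp k v hk
    obtain ⟨fp', heq, hlen', hframe, hval⟩ :=
      ih (k+1) v rest (fp.set k v) cf cb (by simp; omega) hv'
    refine ⟨fp', ?_, by simpa using hlen', ?_, ?_⟩
    · rw [heq]
      have h : k + 1 + m = k + (m + 1) := by omega
      rw [h]
    · intro i hi
      rw [hframe i (by omega), pv_getD_set_ne fp k i v (by omega)]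
    · intro i h1 h2
      rcases Nat.eq_or_lt_of_le h1 with h | h
      · have h' : i = k := h.symm
        subst h'
        rw [hframe i (by omega)]
        exact pv_getD_set_self fp i v hk
      · exact hval i (by omega) (by omega)

theorem pvAltGroupF_congr (f1 : Nat) : ∀ (f2 : Nat) (l : List Char) (pos : Int),
    l.length ≤ f1 → l.length ≤ f2 → pvAltGroupF f1 l pos = pvAltGroupF f2 l pos := by
  induction f1 with
  | zero =>
    intro f2 l pos h1 _
    have : l = [] := List.eq_nil_of_length_eq_zero (Nat.le_zero.mp h1)
    subst this; cases f2 <;> rfl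
  | succ f1 ih =>
    intro f2 l pos h1 h2
    cases l with
    | nil => cases f2 <;> rfl
    | cons c rest =>
      cases f2 with
      | zero => simp at h2
      | succ f2 =>
        rw [pvAltGroupF, pvAltGroupF]
        congr 1
        exact ih f2 _ _
          (le_trans (List.length_dropWhile_le _ _) (by simpa using h1))
          (le_trans (List.length_dropWhile_le _ _) (by simpa using h2))

theorem pvAltGroup_cons (c : Char) (rest : List Char) (pos : Int) :
    pvAltGroup (c :: rest) pos =
      (c, pos, pos + (1 + ((rest.takeWhile (fun d => d == c)).length : Int)) - 1) ::
        pvAltGroup (rest.dropWhile (fun d => d == c))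
          (pos + (1 + ((rest.takeWhile (fun d => d == c)).length : Int))) := by
  rw [pvAltGroup, List.length_cons, pvAltGroupF]
  congr 1
  exact pvAltGroupF_congr _ _ _ _ (List.length_dropWhile_le _ _) le_rfl

theorem pv_takeWhile_replicate (c : Char) (rest : List Char) :
    rest.takeWhile (fun d => d == c) = List.replicate (rest.takeWhile (fun d => d == c)).length c := by
  apply List.eq_replicate_of_mem
  intro x hx
  have := List.mem_takeWhile_imp hx
  simpa using this

theorem pv_head_dropWhile (l : List Char) (p : Char → Bool) (d : Char)
    (h : (l.dropWhile p).head? = some d) : p d = false := by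
  induction l with
  | nil => simp [List.dropWhile] at h
  | cons c rest ih =>
    rw [List.dropWhile_cons] at h
    split at h
    · exact ih h
    · simp_all

theorem pvLoop1_master (n : Nat) : ∀ (l : List Char) (k : Nat) (last : Char) (fp : List Int) (cf cb : Int),
    l.length ≤ n →
    k + l.length ≤ fp.length →
    (∀ c, l.head? = some c → c ≠ 'H' → c ≠ last) →
    ∃ last' fp',
      pvLoop1 l k (last, fp, cf, cb) =
        (last', fp',
         cf + ((pvAltGroup l ((k : Nat) : Int)).map (fun r => if r.1 = 'F' then (1:Int) else 0)).sum,
         cb + ((pvAltGroup l ((k : Nat) : Int)).map (fun r => if r.1 ≠ 'F' ∧ r.1 ≠ 'H' then (1:Int) else 0)).sum)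
      ∧ fp'.length = fp.length
      ∧ (∀ i : Nat, i < k → PySem.List.pyGetD fp' ((i : Nat) : Int) 0 = PySem.List.pyGetD fp ((i : Nat) : Int) 0)
      ∧ (∀ r ∈ pvAltGroup l ((k : Nat) : Int), r.1 ≠ 'H' → PySem.List.pyGetD fp' r.2.2 0 = r.2.1) := by
  induction n with
  | zero =>
    intro l k last fp cf cb hn _ _
    have : l = [] := List.eq_nil_of_length_eq_zero (Nat.le_zero.mp hn)
    subst this
    exact ⟨last, fp, by simp [pvLoop1, pvAltGroup, pvAltGroupF], rfl, fun _ _ => rfl, by simp [pvAltGroup, pvAltGroupF]⟩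
  | succ n ih =>
    intro l k last fp cf cb hn hlen hne
    cases l with
    | nil =>
      exact ⟨last, fp, by simp [pvLoop1, pvAltGroup, pvAltGroupF], rfl, fun _ _ => rfl, by simp [pvAltGroup, pvAltGroupF]⟩
    | cons c rest =>
      have hsplit : rest = List.replicate (rest.takeWhile (fun d => d == c)).length c
          ++ rest.dropWhile (fun d => d == c) := by
        conv_lhs => rw [← List.takeWhile_append_dropWhile (p := fun d => d == c) (l := rest)]
        rw [← pv_takeWhile_replicate]
      set m := (rest.takeWhile (fun d => d == c)).length with hm
      set drop := rest.dropWhile (fun d => d == c) with hdrop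
      have hdroplen : drop.length ≤ rest.length := List.length_dropWhile_le _ _
      have hrestlen : rest.length = m + drop.length := by
        conv_lhs => rw [hsplit]; simp
      have hdropne : ∀ d, drop.head? = some d → d ≠ c := by
        intro d hd
        have := pv_head_dropWhile rest (fun d => d == c) d hd
        simpa using this
      have hcons := pvAltGroup_cons c rest ((k : Nat) : Int)
      simp only [List.length_cons] at hlen hn
      by_cases hc : c = 'H'
      · -- H-run: skipped, no counts, no fp writes
        subst hc
        rw [pvLoop1]
        simp only [if_true]
        have hstep : pvLoop1 rest (k+1) ('H', fp, cf, cb) = pvLoop1 drop (k+1+m) ('H', fp, cf, cb) := by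
          conv_lhs => rw [hsplit]
          exact pvLoop1_H m (k+1) drop fp cf cb
        rw [hstep]
        obtain ⟨last', fp', heq, hlen', hframe, hruns⟩ :=
          ih drop (k + 1 + m) 'H' fp cf cb (by omega) (by omega)
            (fun d hd _ => hdropne d hd)
        refine ⟨last', fp', ?_, hlen', fun i hi => hframe i (by omega), ?_⟩
        · rw [heq, hcons]
          simp only [List.map_cons, List.sum_cons]
          have hcast : ((k : Nat) : Int) + (1 + (m : Int)) = (((k + 1 + m : Nat)) : Int) := by push_cast; ring
          rw [hcast, ← hdrop]
          norm_num
          decide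
        · rw [hcons]
          intro r hr hrH
          rcases List.mem_cons.mp hr with h | h
          · exfalso; rw [h] at hrH; exact hrH rfl
          · have hcast : ((k : Nat) : Int) + (1 + (m : Int)) = (((k + 1 + m : Nat)) : Int) := by push_cast; ring
            rw [hcast] at h
            exact hruns r h hrH
      · -- a real run of c (c ≠ 'H', c ≠ last)
        have hclast : c ≠ last := hne c rfl hc
        have hk : k < fp.length := by omega
        rw [pvLoop1]
        simp only [if_neg hc, if_neg hclast]
        -- step writes fp[k] := k and bumps one counter; δF/δB via the c = 'F' split
        have hv' : PySem.List.pyGetD (fp.set k ((k : Nat) : Int)) (((k+1 : Nat) : Int) - 1) 0 = ((k : Nat) : Int) := by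
          have : (((k+1 : Nat) : Int) - 1) = ((k : Nat) : Int) := by push_cast; ring
          rw [this]; exact pv_getD_set_self fp k _ hk
        have hrunfacts : ∀ (cf' cb' : Int),
            ∃ last' fp', pvLoop1 rest (k+1) (c, fp.set k ((k : Nat) : Int), cf', cb') =
              (last', fp',
               cf' + ((pvAltGroup drop (((k + 1 + m : Nat)) : Int)).map (fun r => if r.1 = 'F' then (1:Int) else 0)).sum,
               cb' + ((pvAltGroup drop (((k + 1 + m : Nat)) : Int)).map (fun r => if r.1 ≠ 'F' ∧ r.1 ≠ 'H' then (1:Int) else 0)).sum)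
              ∧ fp'.length = fp.length
              ∧ (∀ i : Nat, i < k → PySem.List.pyGetD fp' ((i : Nat) : Int) 0 = PySem.List.pyGetD fp ((i : Nat) : Int) 0)
              ∧ (PySem.List.pyGetD fp' (((k + m : Nat)) : Int) 0 = ((k : Nat) : Int))
              ∧ (∀ r ∈ pvAltGroup drop (((k + 1 + m : Nat)) : Int), r.1 ≠ 'H' → PySem.List.pyGetD fp' r.2.2 0 = r.2.1) := by
          intro cf' cb'
          obtain ⟨fp1, heq1, hlen1, hframe1, hval1⟩ :=
            pvLoop1_const c hc m (k+1) ((k : Nat) : Int) drop (fp.set k ((k : Nat) : Int)) cf' cb'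
              (by simp; omega) hv'
          obtain ⟨last', fp2, heq2, hlen2, hframe2, hruns2⟩ :=
            ih drop (k + 1 + m) c fp1 cf' cb' (by omega)
              (by rw [hlen1]; simp; omega)
              (fun d hd _ => hdropne d hd)
          refine ⟨last', fp2, ?_, by rw [hlen2, hlen1]; simp, ?_, ?_, hruns2⟩
          · conv_lhs => rw [hsplit]
            rw [heq1, heq2]
          · intro i hi
            rw [hframe2 i (by omega), hframe1 i (Or.inl (by omega)),
              pv_getD_set_ne fp k i _ (by omega)]
          · rcases Nat.eq_zero_or_pos m with h0 | h0
            · rw [hframe2 (k+m) (by omega), hframe1 (k+m) (Or.inl (by omega))]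
              have hkm : k + m = k := by omega
              rw [hkm]
              exact pv_getD_set_self fp k _ hk
            · rw [hframe2 (k+m) (by omega)]
              exact hval1 (k+m) (by omega) (by omega)
        -- assemble, splitting on whether c is 'F'
        have hends : ((k : Nat) : Int) + (1 + (m : Int)) - 1 = (((k + m : Nat)) : Int) := by push_cast; ring
        have hcast : ((k : Nat) : Int) + (1 + (m : Int)) = (((k + 1 + m : Nat)) : Int) := by push_cast; ring
        by_cases hcF : c = 'F'
        · rw [if_pos hcF]
          obtain ⟨last', fp', heq, hlen', hframe, hend, hruns⟩ := hrunfacts (cf + 1) cb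
          refine ⟨last', fp', ?_, hlen', hframe, ?_⟩
          · rw [heq, hcons]
            simp only [List.map_cons, List.sum_cons]
            rw [if_pos hcF]
            have : ¬ (c ≠ 'F' ∧ c ≠ 'H') := by simp [hcF]
            rw [if_neg this, ← hdrop, ← hm]
            simp only [Prod.mk.injEq, true_and]
            refine ⟨?_, ?_⟩ <;> (push_cast; ring_nf)
          · rw [hcons]
            intro r hr hrH
            rcases List.mem_cons.mp hr with h | h
            · rw [h]; simpa [← hm, hends] using hend
            · rw [hcast] at h
              exact hruns r h hrH
        · rw [if_neg hcF]
          obtain ⟨last', fp', heq, hlen', hframe, hend, hruns⟩ := hrunfacts cf (cb + 1)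
          refine ⟨last', fp', ?_, hlen', hframe, ?_⟩
          · rw [heq, hcons]
            simp only [List.map_cons, List.sum_cons]
            rw [if_neg hcF]
            have : (c ≠ 'F' ∧ c ≠ 'H') := ⟨hcF, hc⟩
            rw [if_pos this, ← hdrop, ← hm]
            simp only [Prod.mk.injEq, true_and]
            refine ⟨?_, ?_⟩ <;> (push_cast; ring_nf)
          · rw [hcons]
            intro r hr hrH
            rcases List.mem_cons.mp hr with h | h
            · rw [h]; simpa [← hm, hends] using hend
            · rw [hcast] at h
              exact hruns r h hrH

theorem pvLoop2_append (flipc : Char) (fp : List Int) (xs : List Char) :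
    ∀ (ys : List Char) (k : Nat) (st : List (Int × Int) × Char),
    pvLoop2 flipc fp (xs ++ ys) k st = pvLoop2 flipc fp xs k (pvLoop2 flipc fp ys (k + xs.length) st) := by
  induction xs with
  | nil => intro ys k st; simp [pvLoop2]
  | cons c xs ih =>
    intro ys k st
    rw [List.cons_append, pvLoop2, pvLoop2]
    rw [ih ys (k+1) st]
    have h : k + 1 + xs.length = k + (xs.length + 1) := by omega
    rw [h]
    rfl

theorem pvLoop2_const (flipc : Char) (fp : List Int) (c : Char) (m : Nat) :
    ∀ (k : Nat) (acc : List (Int × Int)) (last0 : Char),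
    (c = flipc → last0 ≠ c) →
    pvLoop2 flipc fp (List.replicate (m+1) c) k (acc, last0) =
      (if c = flipc then acc ++ [(PySem.List.pyGetD fp (((k + m : Nat)) : Int) 0, ((k + m : Nat) : Int))] else acc, c) := by
  induction m with
  | zero =>
    intro k acc last0 hl
    rw [List.replicate_succ, List.replicate_zero, pvLoop2, pvLoop2]
    by_cases hcf : c = flipc
    · rw [if_pos ⟨hcf, Ne.symm (hl hcf)⟩, if_pos hcf]
      simp
    · rw [if_neg (by simp [hcf]), if_neg hcf]
  | succ m ih =>
    intro k acc last0 hl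
    rw [List.replicate_succ, pvLoop2]
    rw [ih (k+1) acc last0 hl]
    have h : k + 1 + m = k + (m + 1) := by omega
    rw [h]
    by_cases hcf : c = flipc
    · rw [if_pos hcf]
      rw [if_neg (by simp)]
    · rw [if_neg hcf]
      rw [if_neg (by simp [hcf])]

theorem pvLoop2_master (flipc : Char) (fp : List Int) (n : Nat) :
    ∀ (l : List Char) (k : Nat) (acc : List (Int × Int)) (last0 : Char),
    l.length ≤ n →
    last0 ≠ flipc →
    (∀ r ∈ pvAltGroup l ((k : Nat) : Int), r.1 = flipc → PySem.List.pyGetD fp r.2.2 0 = r.2.1) →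
    pvLoop2 flipc fp l k (acc, last0) =
      (acc ++ (((pvAltGroup l ((k : Nat) : Int)).filter (fun r => r.1 == flipc)).map (fun r => (r.2.1, r.2.2))).reverse,
       l.head?.getD last0) := by
  induction n with
  | zero =>
    intro l k acc last0 hn _ _
    have : l = [] := List.eq_nil_of_length_eq_zero (Nat.le_zero.mp hn)
    subst this
    simp [pvLoop2, pvAltGroup, pvAltGroupF]
  | succ n ih =>
    intro l k acc last0 hn hl0 hC1
    cases l with
    | nil => simp [pvLoop2, pvAltGroup, pvAltGroupF]
    | cons c rest =>
      have hsplit : c :: rest = List.replicate ((rest.takeWhile (fun d => d == c)).length + 1) c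
          ++ rest.dropWhile (fun d => d == c) := by
        rw [List.replicate_succ, List.cons_append]
        conv_lhs => rw [← List.takeWhile_append_dropWhile (p := fun d => d == c) (l := rest)]
        rw [← pv_takeWhile_replicate]
      set m := (rest.takeWhile (fun d => d == c)).length with hm
      set drop := rest.dropWhile (fun d => d == c) with hdrop
      have hdropne : ∀ d, drop.head? = some d → d ≠ c := by
        intro d hd
        have := pv_head_dropWhile rest (fun d => d == c) d hd
        simpa using this
      have hrestlen : rest.length = m + drop.length := by
        conv_lhs => rw [show rest = List.replicate m c ++ drop from by
          conv_lhs => rw [← List.takeWhile_append_dropWhile (p := fun d => d == c) (l := rest)]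
          rw [← pv_takeWhile_replicate]]
        simp
      have hcons := pvAltGroup_cons c rest ((k : Nat) : Int)
      simp only [List.length_cons] at hn
      have hcast : ((k : Nat) : Int) + (1 + (m : Int)) = (((k + 1 + m : Nat)) : Int) := by push_cast; ring
      have hends : ((k : Nat) : Int) + (1 + (m : Int)) - 1 = (((k + m : Nat)) : Int) := by push_cast; ring
      conv_lhs => rw [hsplit]
      rw [pvLoop2_append]
      have hlen2 : (List.replicate (m+1) c).length = m + 1 := by simp
      rw [hlen2]
      rw [ih drop (k + (m+1)) acc last0 (by omega) hl0 (by
        intro r hr hrf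
        apply hC1 r _ hrf
        rw [hcons]
        apply List.mem_cons_of_mem
        rw [hcast]
        have : k + 1 + m = k + (m + 1) := by omega
        rw [this] at *
        exact hr)]
      have hlast' : (c = flipc → (drop.head?.getD last0) ≠ c) := by
        intro hcf
        cases hd : drop.head? with
        | none => simp only [Option.getD_none]; rw [hcf]; exact hl0
        | some d => simpa [hd] using hdropne d hd
      rw [pvLoop2_const flipc fp c m k _ _ hlast']
      rw [hcons]
      simp only [List.filter_cons]
      by_cases hcf : c = flipc
      · rw [if_pos hcf, if_pos (by simpa using hcf)]
        have hfpval : PySem.List.pyGetD fp (((k + m : Nat)) : Int) 0 = ((k : Nat) : Int) := by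
          have := hC1 ⟨c, ((k : Nat) : Int), ((k : Nat) : Int) + (1 + (m : Int)) - 1⟩ (by rw [hcons]; exact List.mem_cons_self) hcf
          simpa [hends] using this
        rw [hfpval]
        simp only [List.map_cons, List.reverse_cons]
        have hkm : k + (m + 1) = k + 1 + m := by omega
        rw [hkm, ← hcast, ← hdrop, ← hm]
        simp [hends]
      · rw [if_neg hcf, if_neg (by simpa using hcf)]
        have hkm : k + (m + 1) = k + 1 + m := by omega
        rw [hkm, ← hcast, ← hdrop, ← hm]
        simp

theorem pvRunChars_cons (c : Char) (rest : List Char) :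
    pvRunChars (c :: rest) = c :: pvRunChars (rest.dropWhile (fun d => d == c)) := by
  induction rest generalizing c with
  | nil => simp [pvRunChars, List.dropWhile]
  | cons d rest ih =>
    by_cases h : c = d
    · subst h
      rw [pvRunChars.eq_3]
      rw [if_pos rfl, List.dropWhile_cons_of_pos (by simp), ih c]
    · rw [pvRunChars.eq_3, if_neg h, List.dropWhile_cons_of_neg (by simpa using Ne.symm h)]

theorem pvAltGroup_map_fst (n : Nat) : ∀ (l : List Char) (pos : Int), l.length ≤ n →
    (pvAltGroup l pos).map (fun r => r.1) = pvRunChars l := by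
  induction n with
  | zero =>
    intro l pos hn
    have : l = [] := List.eq_nil_of_length_eq_zero (Nat.le_zero.mp hn)
    subst this; rfl
  | succ n ih =>
    intro l pos hn
    cases l with
    | nil => rfl
    | cons c rest =>
      rw [pvAltGroup_cons, List.map_cons, pvRunChars_cons]
      congr 1
      exact ih _ _ (le_trans (List.length_dropWhile_le _ _) (by simpa using hn))

theorem pv_fp0 (N : Nat) (j : Int) :
    PySem.List.pyGetD ((List.range N).map (fun _ => (0:Int))) j 0 = 0 := by
  unfold PySem.List.pyGetD PySem.List.pyGet?
  cases hk : PySem.List.pyIdx? ((List.range N).map (fun _ => (0:Int))).length j with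
  | none => simp
  | some k =>
    simp only [Option.bind_some]
    cases hg : ((List.range N).map (fun _ => (0:Int)))[k]? with
    | none => simp
    | some v =>
      have hv := List.mem_of_getElem? hg
      simp only [List.mem_map] at hv
      obtain ⟨_, _, hv⟩ := hv
      simp [← hv]

theorem pv_sumF (l : List Char) :
    ((pvAltGroup l 0).map (fun r => if r.1 = 'F' then (1:Int) else 0)).sum
      = ((pvRunChars l).countP (fun c => c == 'F') : Int) := by
  have hfn : (fun (r : Char × Int × Int) => if r.1 = 'F' then (1:Int) else 0)
      = fun r => if ((r.1 == 'F') : Bool) = true then (1:Int) else 0 := by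
    funext r; simp
  rw [hfn, PySem.List.sum_map_ite_one_zero,
    ← pvAltGroup_map_fst l.length l 0 le_rfl, List.countP_map]
  rfl

theorem pv_sumB (l : List Char) :
    ((pvAltGroup l 0).map (fun r => if r.1 ≠ 'F' ∧ r.1 ≠ 'H' then (1:Int) else 0)).sum
      = ((pvRunChars l).countP (fun c => c != 'F' && c != 'H') : Int) := by
  have hfn : (fun (r : Char × Int × Int) => if r.1 ≠ 'F' ∧ r.1 ≠ 'H' then (1:Int) else 0)
      = fun r => if (((r.1 != 'F') && (r.1 != 'H')) : Bool) = true then (1:Int) else 0 := by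
    funext r
    by_cases h1 : r.1 = 'F' <;> by_cases h2 : r.1 = 'H' <;> simp [h1, h2]
  rw [hfn, PySem.List.sum_map_ite_one_zero,
    ← pvAltGroup_map_fst l.length l 0 le_rfl, List.countP_map]
  rfl

theorem pv_core (number_of_cap : Int) (cap_status : String)
    (hpre : number_of_cap ≤ (cap_status.toList.length : Int)) :
    ∃ (cfA cbA : Int),
      flip_cap number_of_cap cap_status =
        (((pvAltGroup (cap_status.toList.take number_of_cap.toNat) 0).filter
            (fun r => r.1 == (if cbA < cfA then 'B' else 'F'))).map (fun r => (r.2.1, r.2.2)))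
      ∧ flip_cap_alt number_of_cap cap_status =
        (((pvAltGroup (cap_status.toList.take number_of_cap.toNat) 0).filter
            (fun r => r.1 == (if
              ((pvAltGroup (cap_status.toList.take number_of_cap.toNat) 0).map (fun r => if r.1 ≠ 'F' ∧ r.1 ≠ 'H' then (1:Int) else 0)).sum <
              ((pvAltGroup (cap_status.toList.take number_of_cap.toNat) 0).map (fun r => if r.1 = 'F' then (1:Int) else 0)).sum
              then 'B' else 'F'))).map (fun r => (r.2.1, r.2.2)))
      ∧ cfA = ((pvAltGroup (cap_status.toList.take number_of_cap.toNat) 0).map (fun r => if r.1 = 'F' then (1:Int) else 0)).sum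
      ∧ cbA = ((pvAltGroup (cap_status.toList.take number_of_cap.toNat) 0).map (fun r => if r.1 ≠ 'F' ∧ r.1 ≠ 'H' then (1:Int) else 0)).sum
          - (if (cap_status.toList.take number_of_cap.toNat).head? = some '#' then 1 else 0) := by
  set cs := cap_status.toList with hcs
  set N := number_of_cap.toNat with hN
  set l := cs.take N with hl
  have hNlen : N ≤ cs.length := Int.toNat_le.mpr hpre
  have hllen : l.length = N := by rw [hl]; simp [hNlen]
  have hj0 : ∀ j, (h : j < l.length) → PySem.List.pyGetD cs ((0 + j : Nat) : Int) ' ' = l[j] := by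
    intro j hjl
    rw [PySem.List.pyGetD_natCast, Nat.zero_add]
    have hjN : j < N := by omega
    have hjcs : j < cs.length := by omega
    rw [List.getD_eq_getElem cs ' ' hjcs]
    exact (List.getElem_take (xs := cs) (j := N) (i := j)).symm
  have hcaps : (List.range N).map (fun i => PySem.List.pyGetD cs ((i : Nat) : Int) ' ') = l := by
    apply List.ext_getElem
    · simp [hllen]
    · intro i h1 h2
      simp only [List.getElem_map, List.getElem_range]
      have := hj0 i (by simpa [hllen] using h2)
      simpa using this
  set fp0 : List Int := (List.range N).map (fun _ => (0:Int)) with hfp0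
  have hfp0len : fp0.length = N := by simp [hfp0]
  set runs := pvAltGroup l 0 with hrunseq
  set cfB := (runs.map (fun r => if r.1 = 'F' then (1:Int) else 0)).sum with hcfBeq
  set cbB := (runs.map (fun r => if r.1 ≠ 'F' ∧ r.1 ≠ 'H' then (1:Int) else 0)).sum with hcbBeq
  have hcfB : cfB = ((pvRunChars l).countP (fun c => c == 'F') : Int) := by
    rw [hcfBeq, hrunseq]
    have hfn : (fun (r : Char × Int × Int) => if r.1 = 'F' then (1:Int) else 0)
        = fun r => if ((r.1 == 'F') : Bool) = true then (1:Int) else 0 := by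
      funext r; simp
    rw [hfn, PySem.List.sum_map_ite_one_zero,
      ← pvAltGroup_map_fst l.length l 0 le_rfl, List.countP_map]
    rfl
  have hcbB : cbB = ((pvRunChars l).countP (fun c => c != 'F' && c != 'H') : Int) := by
    rw [hcbBeq, hrunseq]
    have hfn : (fun (r : Char × Int × Int) => if r.1 ≠ 'F' ∧ r.1 ≠ 'H' then (1:Int) else 0)
        = fun r => if (((r.1 != 'F') && (r.1 != 'H')) : Bool) = true then (1:Int) else 0 := by
      funext r
      by_cases h1 : r.1 = 'F' <;> by_cases h2 : r.1 = 'H' <;> simp [h1, h2]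
    rw [hfn, PySem.List.sum_map_ite_one_zero,
      ← pvAltGroup_map_fst l.length l 0 le_rfl, List.countP_map]
    rfl
  have hmain : ∃ (last' : Char) (fp' : List Int) (cfA cbA : Int),
      pvLoop1 l 0 ('#', fp0, 0, 0) = (last', fp', cfA, cbA)
      ∧ (∀ r ∈ runs, r.1 ≠ 'H' → PySem.List.pyGetD fp' r.2.2 0 = r.2.1)
      ∧ cfA = cfB
      ∧ cbA = cbB - (if l.head? = some '#' then 1 else 0) := by
    by_cases hhead : l.head? = some '#'
    · -- leading '#' run: A's sentinel swallows it
      obtain ⟨rest, hl'⟩ : ∃ rest, l = '#' :: rest := by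
        cases hx : l with
        | nil => rw [hx] at hhead; simp at hhead
        | cons c rest =>
          have hc : c = '#' := by rw [hx] at hhead; simpa using hhead
          exact ⟨rest, by rw [hc]⟩
      have hlenrest : rest.length + 1 = N := by rw [← hllen, hl']; simp
      set m := (rest.takeWhile (fun d => d == '#')).length with hm
      set drop := rest.dropWhile (fun d => d == '#') with hdrop
      have hsplit : ('#' :: rest) = List.replicate (m+1) '#' ++ drop := by
        rw [List.replicate_succ, List.cons_append]
        conv_lhs => rw [← List.takeWhile_append_dropWhile (p := fun d => d == '#') (l := rest)]
        rw [← pv_takeWhile_replicate]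
      have hrestlen : rest.length = m + drop.length := by
        conv_lhs => rw [show rest = List.replicate m '#' ++ drop from by
          conv_lhs => rw [← List.takeWhile_append_dropWhile (p := fun d => d == '#') (l := rest)]
          rw [← pv_takeWhile_replicate]]
        simp
      obtain ⟨fp1, heq1, hlen1, hframe1, hval1⟩ :=
        pvLoop1_const '#' (by decide) (m+1) 0 0 drop fp0 0 0
          (by rw [hfp0len]; omega) (by exact pv_fp0 N _)
      have hdropne : ∀ d, drop.head? = some d → d ≠ '#' := by
        intro d hd
        have := pv_head_dropWhile rest (fun d => d == '#') d hd
        simpa using this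
      obtain ⟨last', fp2, heq2, hlen2, hframe2, hruns2⟩ :=
        pvLoop1_master drop.length drop (0 + (m+1)) '#' fp1 0 0 le_rfl
          (by rw [hlen1, hfp0len]; omega)
          (fun d hd _ => hdropne d hd)
      have hcons := pvAltGroup_cons '#' rest (0 : Int)
      have hcast : (0 : Int) + (1 + (m : Int)) = (((0 + (m + 1) : Nat)) : Int) := by push_cast; ring
      have hends : (0 : Int) + (1 + (m : Int)) - 1 = ((m : Nat) : Int) := by ring
      have hSF : cfB = ((pvAltGroup drop (((0 + (m+1) : Nat)) : Int)).map (fun r => if r.1 = 'F' then (1:Int) else 0)).sum := by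
        rw [hcfBeq, hrunseq, hl', hcons]
        simp only [← hm, ← hdrop, hcast, List.map_cons, List.sum_cons]
        norm_num
        decide
      have hSB : cbB = 1 + ((pvAltGroup drop (((0 + (m+1) : Nat)) : Int)).map (fun r => if r.1 ≠ 'F' ∧ r.1 ≠ 'H' then (1:Int) else 0)).sum := by
        rw [hcbBeq, hrunseq, hl', hcons]
        simp only [← hm, ← hdrop, hcast, List.map_cons, List.sum_cons]
        rw [if_pos (by decide : ('#':Char) ≠ 'F' ∧ ('#':Char) ≠ 'H')]
      refine ⟨last', fp2,
        0 + ((pvAltGroup drop (((0 + (m+1) : Nat)) : Int)).map (fun r => if r.1 = 'F' then (1:Int) else 0)).sum,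
        0 + ((pvAltGroup drop (((0 + (m+1) : Nat)) : Int)).map (fun r => if r.1 ≠ 'F' ∧ r.1 ≠ 'H' then (1:Int) else 0)).sum,
        ?_, ?_, ?_, ?_⟩
      · conv_lhs => rw [hl', hsplit]
        rw [heq1, heq2]
      · intro r hr hrH
        rw [hrunseq, hl', hcons] at hr
        rcases List.mem_cons.mp hr with h | h
        · rw [h]
          simp only [← hm]
          rw [hends, hframe2 m (by omega)]
          exact hval1 m (by omega) (by omega)
        · simp only [← hm, ← hdrop] at h
          rw [hcast] at h
          exact hruns2 r h hrH
      · rw [hSF]; ring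
      · rw [hSB, if_pos hhead]; ring
    · -- no leading '#': A counts every run that B counts
      obtain ⟨last', fp', heq, hlen', hframe, hruns'⟩ :=
        pvLoop1_master l.length l 0 '#' fp0 0 0 le_rfl (by rw [hfp0len]; omega)
          (fun c hc _ => by intro h; rw [h] at hc; exact hhead hc)
      refine ⟨last', fp',
        0 + ((pvAltGroup l ((0 : Nat) : Int)).map (fun r => if r.1 = 'F' then (1:Int) else 0)).sum,
        0 + ((pvAltGroup l ((0 : Nat) : Int)).map (fun r => if r.1 ≠ 'F' ∧ r.1 ≠ 'H' then (1:Int) else 0)).sum,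
        heq, ?_, ?_, ?_⟩
      · intro r hr hrH
        apply hruns' r _ hrH
        rw [hrunseq] at hr
        simpa using hr
      · simp only [Nat.cast_zero, ← hrunseq, zero_add, ← hcfBeq]
      · simp only [Nat.cast_zero, ← hrunseq, zero_add, ← hcbBeq]
        rw [if_neg hhead]; ring
  obtain ⟨last', fp', cfA, cbA, hloop1, hfpruns, hcfA, hcbA⟩ := hmain
  set flipcA : Char := if cbA < cfA then 'B' else 'F' with hflipcA
  set flipcB : Char := if cbB < cfB then 'B' else 'F' with hflipcB
  have hABF : flipcA ≠ '#' ∧ flipcA ≠ 'H' := by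
    rw [hflipcA]; split_ifs <;> exact ⟨by decide, by decide⟩
  have hC1 : ∀ r ∈ pvAltGroup l ((0:Nat):Int), r.1 = flipcA → PySem.List.pyGetD fp' r.2.2 0 = r.2.1 := by
    intro r hr hrf
    apply hfpruns r (by rw [hrunseq]; simpa using hr)
    rw [hrf]; exact hABF.2
  have hloop2 := pvLoop2_master flipcA fp' l.length l 0 [] '#' le_rfl (Ne.symm hABF.1) hC1
  have hrange : List.range N = List.range' 0 l.length := by rw [hllen, List.range_eq_range']
  have hA : flip_cap number_of_cap cap_status =
      ((((pvAltGroup l ((0:Nat):Int)).filter (fun r => r.1 == flipcA)).map (fun r => (r.2.1, r.2.2)))) := by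
    simp only [flip_cap]
    rw [hrange, pv_bridge1 cs l 0 _ hj0]
    rw [show (List.range' 0 l.length).map (fun _ => (0:Int)) = fp0 from by rw [← hrange]]
    rw [hloop1]
    dsimp only
    rw [← hflipcA]
    rw [pv_bridge2 cs flipcA fp' l 0 _ hj0]
    rw [hloop2]
    simp
  have hB : flip_cap_alt number_of_cap cap_status =
      ((((pvAltGroup l ((0:Nat):Int)).filter (fun r => r.1 == flipcB)).map (fun r => (r.2.1, r.2.2)))) := by
    simp only [flip_cap_alt]
    rw [hcaps]
    simp only [Nat.cast_zero, ← hrunseq, ← hcfBeq, ← hcbBeq, ← hflipcB]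
  refine ⟨cfA, cbA, ?_, ?_, ?_, ?_⟩
  · rw [hA]
    simp only [Nat.cast_zero, hflipcA, ← hrunseq]
  · rw [hB]
    simp only [Nat.cast_zero, hflipcB, hcfBeq, hcbBeq, ← hrunseq]
  · rw [hcfA, hcfBeq, hrunseq]
  · rw [hcbA, hcbBeq, hrunseq]

theorem pv_start_ge (n : Nat) : ∀ (l : List Char) (pos : Int), l.length ≤ n →
    ∀ r ∈ pvAltGroup l pos, pos ≤ r.2.1 := by
  induction n with
  | zero =>
    intro l pos hn r hr
    have : l = [] := List.eq_nil_of_length_eq_zero (Nat.le_zero.mp hn)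
    subst this; simp [pvAltGroup, pvAltGroupF] at hr
  | succ n ih =>
    intro l pos hn r hr
    cases l with
    | nil => simp [pvAltGroup, pvAltGroupF] at hr
    | cons c rest =>
      rw [pvAltGroup_cons] at hr
      rcases List.mem_cons.mp hr with h | h
      · rw [h]
      · have := ih (rest.dropWhile (fun d => d == c)) _
          (le_trans (List.length_dropWhile_le _ _) (by simpa using hn)) r h
        have hlen : (0:Int) ≤ 1 + ((rest.takeWhile (fun d => d == c)).length : Int) := by positivity
        omega

theorem pv_starts_lt (n : Nat) : ∀ (l : List Char) (pos : Int), l.length ≤ n →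
    (pvAltGroup l pos).Pairwise (fun a b => a.2.1 < b.2.1) := by
  induction n with
  | zero =>
    intro l pos hn
    have : l = [] := List.eq_nil_of_length_eq_zero (Nat.le_zero.mp hn)
    subst this; simp [pvAltGroup, pvAltGroupF]
  | succ n ih =>
    intro l pos hn
    cases l with
    | nil => simp [pvAltGroup, pvAltGroupF]
    | cons c rest =>
      rw [pvAltGroup_cons]
      refine List.Pairwise.cons ?_ (ih _ _ (le_trans (List.length_dropWhile_le _ _) (by simpa using hn)))
      intro b hb
      dsimp only
      have := pv_start_ge (rest.dropWhile (fun d => d == c)).length _ _ le_rfl b hb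
      have hlen : (0:Int) ≤ ((rest.takeWhile (fun d => d == c)).length : Int) := by positivity
      omega

theorem pv_mem_start_inj (L : List (Char × Int × Int))
    (hp : L.Pairwise (fun a b => a.2.1 < b.2.1)) :
    ∀ a ∈ L, ∀ b ∈ L, a.2.1 = b.2.1 → a = b := by
  induction L with
  | nil => intro a ha; simp at ha
  | cons c T ih =>
    rw [List.pairwise_cons] at hp
    obtain ⟨hhead, htail⟩ := hp
    intro a ha b hb heq
    rcases List.mem_cons.mp ha with h1 | h1 <;> rcases List.mem_cons.mp hb with h2 | h2
    · rw [h1, h2]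
    · exfalso; have := hhead b h2; rw [h1] at heq; omega
    · exfalso; have := hhead a h1; rw [h2] at heq; omega
    · exact ih htail a h1 b h2 heq

theorem pv_spec (number_of_cap : Int) (cap_status : String)
    (hpre : number_of_cap ≤ (cap_status.toList.length : Int))
    (hnd : ¬ (1 ≤ number_of_cap ∧
      (cap_status.toList.take number_of_cap.toNat).head? = some '#' ∧
      (pvRunChars (cap_status.toList.take number_of_cap.toNat)).countP (fun c => c == 'F')
        = (pvRunChars (cap_status.toList.take number_of_cap.toNat)).countP (fun c => c != 'F' && c != 'H'))) :
    flip_cap number_of_cap cap_status = flip_cap_alt number_of_cap cap_status := by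
  obtain ⟨cfA, cbA, hA, hB, hcf, hcb⟩ := pv_core number_of_cap cap_status hpre
  set l := cap_status.toList.take number_of_cap.toNat with hl
  rw [hA, hB]
  have hflip : (if cbA < cfA then 'B' else 'F')
      = (if ((pvAltGroup l 0).map (fun r => if r.1 ≠ 'F' ∧ r.1 ≠ 'H' then (1:Int) else 0)).sum
            < ((pvAltGroup l 0).map (fun r => if r.1 = 'F' then (1:Int) else 0)).sum then 'B' else 'F') := by
    by_cases hhead : l.head? = some '#'
    · have hn1 : 1 ≤ number_of_cap := by
        rcases l with _ | ⟨c, rest⟩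
        · simp at hhead
        · have : 0 < number_of_cap.toNat := by
            by_contra h
            have : number_of_cap.toNat = 0 := by omega
            rw [hl] at *
            simp_all
          omega
      have hcne : ¬ ((pvRunChars l).countP (fun c => c == 'F')
          = (pvRunChars l).countP (fun c => c != 'F' && c != 'H')) := by
        intro h
        exact hnd ⟨hn1, hhead, h⟩
      have hsne : ((pvAltGroup l 0).map (fun r => if r.1 = 'F' then (1:Int) else 0)).sum
          ≠ ((pvAltGroup l 0).map (fun r => if r.1 ≠ 'F' ∧ r.1 ≠ 'H' then (1:Int) else 0)).sum := by
        rw [pv_sumF, pv_sumB]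
        intro h
        exact hcne (by exact_mod_cast h)
      rw [hcf, hcb, if_pos hhead]
      split_ifs with h1 h2 <;> first | rfl | (exfalso; omega)
    · rw [hcf, hcb, if_neg hhead]
      norm_num
  rw [hflip]

theorem pv_tight (number_of_cap : Int) (cap_status : String)
    (hpre : number_of_cap ≤ (cap_status.toList.length : Int))
    (hd1 : (cap_status.toList.take number_of_cap.toNat).head? = some '#')
    (hd2 : (pvRunChars (cap_status.toList.take number_of_cap.toNat)).countP (fun c => c == 'F')
        = (pvRunChars (cap_status.toList.take number_of_cap.toNat)).countP (fun c => c != 'F' && c != 'H')) :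
    flip_cap number_of_cap cap_status ≠ flip_cap_alt number_of_cap cap_status := by
  obtain ⟨cfA, cbA, hA, hB, hcf, hcb⟩ := pv_core number_of_cap cap_status hpre
  set l := cap_status.toList.take number_of_cap.toNat with hl
  set runs := pvAltGroup l 0 with hruns
  -- the leading '#' run makes the other-run count positive, hence also the F-run count
  have hc1 : 1 ≤ (pvRunChars l).countP (fun c => c != 'F' && c != 'H') := by
    obtain ⟨rest, hl'⟩ : ∃ rest, l = '#' :: rest := by
      cases hx : l with
      | nil => rw [hx] at hd1; simp at hd1
      | cons c rest =>
        have hc : c = '#' := by rw [hx] at hd1; simpa using hd1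
        exact ⟨rest, by rw [hc]⟩
    have hmem : '#' ∈ pvRunChars l := by
      rw [hl', pvRunChars_cons]; exact List.mem_cons_self
    have : 0 < (pvRunChars l).countP (fun c => c != 'F' && c != 'H') :=
      List.countP_pos_iff.mpr ⟨'#', hmem, by decide⟩
    omega
  have hlenF : 1 ≤ (runs.filter (fun r => r.1 == 'F')).length := by
    have h1 : (runs.filter (fun r => r.1 == 'F')).length = runs.countP (fun r => r.1 == 'F') :=
      List.countP_eq_length_filter.symm
    have h2 : runs.countP (fun r => r.1 == 'F') = (pvRunChars l).countP (fun c => c == 'F') := by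
      rw [← pvAltGroup_map_fst l.length l 0 le_rfl, List.countP_map, hruns]
      rfl
    omega
  -- A flips 'B', B flips 'F'
  have hsums : ((pvAltGroup l 0).map (fun r => if r.1 = 'F' then (1:Int) else 0)).sum
      = ((pvAltGroup l 0).map (fun r => if r.1 ≠ 'F' ∧ r.1 ≠ 'H' then (1:Int) else 0)).sum := by
    rw [pv_sumF, pv_sumB, hd2]
  have hflipA : (if cbA < cfA then 'B' else 'F') = 'B' := by
    rw [if_pos ?_]
    rw [hcf, hcb, if_pos hd1, hsums]
    have : (1:Int) ≤ ((pvRunChars l).countP (fun c => c != 'F' && c != 'H') : Int) := by exact_mod_cast hc1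
    rw [pv_sumB]
    omega
  have hflipB : (if ((pvAltGroup l 0).map (fun r => if r.1 ≠ 'F' ∧ r.1 ≠ 'H' then (1:Int) else 0)).sum
      < ((pvAltGroup l 0).map (fun r => if r.1 = 'F' then (1:Int) else 0)).sum then 'B' else 'F') = 'F' := by
    rw [if_neg]
    rw [hsums]
    omega
  rw [hA, hB, hflipA, hflipB]
  intro heq
  -- the two run lists would have to share a head with equal start positions
  cases hLB : runs.filter (fun r => r.1 == 'F') with
  | nil => rw [hLB] at hlenF; simp at hlenF
  | cons rF tF =>
    rw [hLB] at heq
    cases hLA : runs.filter (fun r => r.1 == 'B') with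
    | nil => rw [hLA] at heq; simp at heq
    | cons rA tA =>
      rw [hLA] at heq
      simp only [List.map_cons, List.cons.injEq, Prod.mk.injEq] at heq
      have hstart : rA.2.1 = rF.2.1 := heq.1.1
      have hmemA : rA ∈ runs ∧ (rA.1 == 'B') = true := by
        have : rA ∈ runs.filter (fun r => r.1 == 'B') := by rw [hLA]; exact List.mem_cons_self
        exact List.mem_filter.mp this
      have hmemF : rF ∈ runs ∧ (rF.1 == 'F') = true := by
        have : rF ∈ runs.filter (fun r => r.1 == 'F') := by rw [hLB]; exact List.mem_cons_self
        exact List.mem_filter.mp this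
      have := pv_mem_start_inj runs (by rw [hruns]; exact pv_starts_lt l.length l 0 le_rfl)
        rA hmemA.1 rF hmemF.1 hstart
      rw [this] at hmemA
      have h1 : rF.1 = 'B' := by simpa using hmemA.2
      have h2 : rF.1 = 'F' := by simpa using hmemF.2
      rw [h1] at h2
      exact absurd h2 (by decide)

-- ===== VERDICT (by name: the statement is the Claim_ definition above) =====
theorem flip_cap_spec : Claim_unchanged_flip_cap := by
  intro number_of_cap cap_status _ hpre hnd
  unfold Pre_flip_cap at hpre
  unfold D_flip_cap at hnd
  exact pv_spec number_of_cap cap_status hpre hnd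

theorem flip_cap_changed : Claim_changed_flip_cap := by
  unfold Claim_changed_flip_cap; decide

theorem flip_cap_tight : Claim_exact_flip_cap := by
  intro number_of_cap cap_status _ hpre hd
  unfold Pre_flip_cap at hpre
  unfold D_flip_cap at hd
  exact pv_tight number_of_cap cap_status hpre hd.2.1 hd.2.2
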